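-- pv_equiv track=rewrite | github.com/sain666/python | quiz/quiz6.py | max_number_of_spikes
-- ===== SOURCE A (Python) =====
-- def max_number_of_spikes(paths):
--     visited = set()
--     result = 1
--
--     def dfs(path):
--         spike_num = 0
--         stack = [path]
--         while stack:
--             n_num = 0
--             curr = stack.pop()
--             visited.add(tuple(curr))
--             for dx, dy in [(1, 0), (-1, 0), (0, 1), (0, -1)]:
--                 neighbor = (curr[0] + dx, curr[1] + dy)
--                 neighbor = list(neighbor)
--                 if any(neighbor == path for path in paths):
--                     neighbor = tuple(neighbor)
--                     n_num += 1
--                     if neighbor not in visited: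
--                         stack.append(neighbor)
--             if n_num == 1:
--                 spike_num += 1
--
--         return spike_num
--
--     for path in paths:
--         if tuple(path) not in visited:
--             temp = dfs(path)
--             result = max(result, temp)
--
--     return result
-- ===== SOURCE B (Python) =====
-- def max_number_of_spikes(paths):
--     # Components found by set saturation (fixpoint closure) over the distinct
--     # node set, with neighbours looked up in a prebuilt set; degree-1 nodes are
--     # counted per finished component. Return value only; no mutation.
--     nodes = set(map(tuple, paths))
--
--     def neighbors(v):
--         x, y = v[0], v[1]
--         return [n for n in ((x + 1, y), (x - 1, y), (x, y + 1), (x, y - 1)) if n in nodes]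
--
--     best = 1
--     done = set()
--     for p in paths:
--         v = tuple(p)
--         if v in done:
--             continue
--         comp = {v}
--         while True:
--             grown = comp | {n for u in comp for n in neighbors(u)}
--             if len(grown) == len(comp):
--                 break
--             comp = grown
--         done |= comp
--         best = max(best, sum(len(neighbors(u)) == 1 for u in comp))
--     return best
-- ===== Notes on version B (the rewrite author's own statement) =====
-- stated objective: faster
-- what changed: Connected components are found by saturating a node set to a fixpoint against a prebuilt coordinate set, with per-node degrees looked up in that set and summed per finished component, instead of an explicit DFS stack that rescans the whole path list for every direction of every popped node and counts spikes during the traversal.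
-- outside the precondition, e.g. on max_number_of_spikes([[1, 1], [1, 0], [2, 1, 0]]): A returns 2, B returns 3; on max_number_of_spikes([[0]]): A raises IndexError, B raises IndexError
import Mathlib
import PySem

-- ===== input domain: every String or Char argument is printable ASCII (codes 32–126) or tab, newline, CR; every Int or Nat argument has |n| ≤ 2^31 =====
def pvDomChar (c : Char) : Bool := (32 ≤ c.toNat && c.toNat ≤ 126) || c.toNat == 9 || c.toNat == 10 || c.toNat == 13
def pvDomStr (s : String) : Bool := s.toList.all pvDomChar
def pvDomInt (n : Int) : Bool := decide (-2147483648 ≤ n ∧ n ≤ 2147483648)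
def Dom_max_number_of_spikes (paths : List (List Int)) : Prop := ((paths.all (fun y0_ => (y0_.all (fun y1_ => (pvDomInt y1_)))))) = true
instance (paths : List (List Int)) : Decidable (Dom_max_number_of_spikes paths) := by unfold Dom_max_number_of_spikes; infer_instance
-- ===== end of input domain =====

-- B finds components by set saturation to a fixpoint over a prebuilt coordinate set
-- (degrees looked up per node) instead of A's DFS stack that rescans the path list;
-- return value only (neither version mutates its argument observably).


-- ===== PORT A =====
-- the four (dx, dy) directions, in A's order
def pvDirs : List (Int × Int) := [(1, 0), (-1, 0), (0, 1), (0, -1)]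

-- curr[0] / curr[1]; the .getD default is unreachable under Pre_ (every list has length 2)
def pvC0 (l : List Int) : Int := (PySem.List.pyGet? l 0).getD 0
def pvC1 (l : List Int) : Int := (PySem.List.pyGet? l 1).getD 0

-- A's inner 'for dx, dy in …' loop: counts present neighbours and collects the
-- unvisited ones to push, in direction order
def pvScanA (paths : List (List Int)) (visited : PySem.Set (List Int)) (curr : List Int) :
    Int × List (List Int) :=
  pvDirs.foldl
    (fun (acc : Int × List (List Int)) d =>
      let nb := [pvC0 curr + d.1, pvC1 curr + d.2]
      if paths.any (fun p => p == nb) then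
        (acc.1 + 1, if nb ∈ visited then acc.2 else acc.2 ++ [nb])
      else acc)
    (0, [])

-- A's 'while stack' loop; the stack is kept top-first (Python appends and pops at the
-- right end; consing the reversed pushes of one iteration gives the same pop order).
-- fuel only makes the recursion total; under Pre_ it is proved sufficient.
def pvDfsA (paths : List (List Int)) :
    Nat → List (List Int) → PySem.Set (List Int) → Int → PySem.Set (List Int) × Int
  | 0, _, visited, spike => (visited, spike)
  | Nat.succ fuel, stack, visited, spike =>
    match stack with
    | [] => (visited, spike)
    | curr :: rest =>
      let visited' := PySem.Set.add visited curr
      let s := pvScanA paths visited' curr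
      pvDfsA paths fuel (s.2.reverse ++ rest) visited' (if s.1 == 1 then spike + 1 else spike)

def max_number_of_spikes (paths : List (List Int)) : Int :=
  (paths.foldl
    (fun (acc : PySem.Set (List Int) × Int) path =>
      if path ∈ acc.1 then acc
      else
        let r := pvDfsA paths (5 * paths.length + 2) [path] acc.1 0
        (r.1, max acc.2 r.2))
    (PySem.Set.empty, 1)).2

-- ===== PORT B =====
-- neighbours of v that are present, looked up in the prebuilt node set
def pvNbrsB (nodes : PySem.Set (List Int)) (v : List Int) : List (List Int) :=
  (pvDirs.map (fun d => [pvC0 v + d.1, pvC1 v + d.2])).filter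
    (fun n => PySem.Set.contains nodes n)

-- comp | {n for u in comp for n in neighbors(u)}
def pvGrowB (nodes : PySem.Set (List Int)) (comp : PySem.Set (List Int)) : PySem.Set (List Int) :=
  comp.foldl (fun s u => PySem.Set.update s (pvNbrsB nodes u)) comp

-- the 'while True: grow; break when the size stops increasing' loop; fuel only
-- makes it total, and is proved sufficient under Pre_
def pvSatB (nodes : PySem.Set (List Int)) : Nat → PySem.Set (List Int) → PySem.Set (List Int)
  | 0, comp => comp
  | Nat.succ fuel, comp =>
    let grown := pvGrowB nodes comp
    if grown.length = comp.length then comp else pvSatB nodes fuel grown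

def max_number_of_spikes_alt (paths : List (List Int)) : Int :=
  let nodes := PySem.Set.ofList paths
  (paths.foldl
    (fun (acc : PySem.Set (List Int) × Int) p =>
      if p ∈ acc.1 then acc
      else
        let comp := pvSatB nodes (paths.length + 2) (PySem.Set.add PySem.Set.empty p)
        (PySem.Set.update acc.1 comp,
         max acc.2 (comp.foldl (fun s u => s + (if (pvNbrsB nodes u).length == 1 then 1 else 0)) 0)))
    (PySem.Set.empty, 1)).2

-- ===== PRECONDITION & SPEC =====
-- Pre_ excludes coordinate lists shorter than 2 (A raises IndexError there) and
-- overlong (length > 2) lists that are 4-adjacent to a present 2-element coordinate: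
-- A compares a freshly built 2-element neighbour list against the whole path, so such
-- a list acts as a start node but never as a neighbour, giving order-dependent
-- accidental values; overlong lists adjacent to nothing behave as isolated nodes.
def Pre_max_number_of_spikes (paths : List (List Int)) : Prop :=
  ∀ p ∈ paths, 2 ≤ p.length ∧
    (p.length = 2 ∨ ∀ d ∈ pvDirs, ¬ [pvC0 p + d.1, pvC1 p + d.2] ∈ paths)
instance (paths : List (List Int)) : Decidable (Pre_max_number_of_spikes paths) := by
  unfold Pre_max_number_of_spikes; infer_instance

def pvWitness_max_number_of_spikes : List (List Int) := [[0, 0], [1, 0], [4, 5]]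

def Spec_max_number_of_spikes (paths : List (List Int)) (out : Int) : Prop :=
  out = max_number_of_spikes_alt paths
instance (paths : List (List Int)) (out : Int) : Decidable (Spec_max_number_of_spikes paths out) := by
  unfold Spec_max_number_of_spikes; infer_instance

-- ===== CLAIM (what is proved, stated in full; the proofs are below) =====
def Claim_equal_max_number_of_spikes : Prop :=
  ∀ (paths : List (List Int)), Dom_max_number_of_spikes paths →
    Pre_max_number_of_spikes paths →
      Spec_max_number_of_spikes paths (max_number_of_spikes paths)

-- ===== LEMMAS AND PROOFS =====

-- adjacency of A's grid walk: v is a present 4-neighbour of u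
def pvAdj (paths : List (List Int)) (u v : List Int) : Prop :=
  v ∈ paths ∧ ∃ d ∈ pvDirs, v = [pvC0 u + d.1, pvC1 u + d.2]

-- reachability
def pvReach (paths : List (List Int)) (u v : List Int) : Prop :=
  Relation.ReflTransGen (pvAdj paths) u v

-- number of present neighbours
def pvDeg (paths : List (List Int)) (v : List Int) : Nat :=
  (pvNbrsB (PySem.Set.ofList paths) v).length

-- number of distinct nodes not yet visited (termination measure component)
def pvUnvis (paths : List (List Int)) (visited : List (List Int)) : Nat :=
  (PySem.List.dedup paths).countP (fun v => ¬ v ∈ visited)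

theorem pvC0_pair (a b : Int) : pvC0 [a, b] = a := rfl
theorem pvC1_pair (a b : Int) : pvC1 [a, b] = b := rfl

theorem pv_present_eq (paths : List (List Int)) (nb : List Int) :
    (paths.any fun p => p == nb) = PySem.Set.contains (PySem.Set.ofList paths) nb := by
  by_cases h : nb ∈ paths
  · have h1 : (paths.any fun p => p == nb) = true := by
      simp only [List.any_eq_true, beq_iff_eq]; exact ⟨nb, h, rfl⟩
    have h2 : PySem.Set.contains (PySem.Set.ofList paths) nb = true := by
      rw [PySem.Set.contains_iff, PySem.Set.mem_ofList]; exact h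
    rw [h1, h2]
  · have h1 : (paths.any fun p => p == nb) = false := by
      simp only [List.any_eq_false, beq_iff_eq]; intro x hx hx'; exact h (hx' ▸ hx)
    have h2 : PySem.Set.contains (PySem.Set.ofList paths) nb = false := by
      rw [Bool.eq_false_iff]; intro hc
      exact h ((PySem.Set.mem_ofList _ _).mp ((PySem.Set.contains_iff _ _).mp hc))
    rw [h1, h2]

theorem pv_mem_nbrsB (paths : List (List Int)) (v n : List Int) :
    n ∈ pvNbrsB (PySem.Set.ofList paths) v ↔ pvAdj paths v n := by
  simp only [pvNbrsB, pvAdj, List.mem_filter, List.mem_map, PySem.Set.contains_iff,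
    PySem.Set.mem_ofList]
  constructor
  · rintro ⟨⟨d, hd, rfl⟩, hmem⟩; exact ⟨hmem, d, hd, rfl⟩
  · rintro ⟨hmem, d, hd, rfl⟩; exact ⟨⟨d, hd, rfl⟩, hmem⟩

theorem pv_scan_go (paths : List (List Int)) (vis : PySem.Set (List Int)) (curr : List Int)
    (L : List (Int × Int)) (c : Int) (acc : List (List Int)) :
    L.foldl
      (fun (acc : Int × List (List Int)) d =>
        let nb := [pvC0 curr + d.1, pvC1 curr + d.2]
        if paths.any (fun p => p == nb) then
          (acc.1 + 1, if nb ∈ vis then acc.2 else acc.2 ++ [nb])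
        else acc)
      (c, acc) =
    (c + (((L.map fun d => [pvC0 curr + d.1, pvC1 curr + d.2]).filter
            (fun n => PySem.Set.contains (PySem.Set.ofList paths) n)).length : Int),
     acc ++ ((L.map fun d => [pvC0 curr + d.1, pvC1 curr + d.2]).filter
            (fun n => PySem.Set.contains (PySem.Set.ofList paths) n)).filter
            (fun n => decide (¬ n ∈ vis))) := by
  induction L generalizing c acc with
  | nil => simp
  | cons d L ih =>
    simp only [List.foldl_cons, List.map_cons, List.filter_cons]
    rw [pv_present_eq paths [pvC0 curr + d.1, pvC1 curr + d.2]]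
    by_cases hp : PySem.Set.contains (PySem.Set.ofList paths) [pvC0 curr + d.1, pvC1 curr + d.2] = true
    · simp only [hp, if_true]
      rw [ih]
      by_cases hv : [pvC0 curr + d.1, pvC1 curr + d.2] ∈ vis
      · simp only [hv, if_true, List.filter_cons, decide_not, decide_eq_true_eq]
        simp [hv]
        ring
      · simp only [hv, if_false, List.filter_cons]
        simp [hv]
        ring
    · simp only [Bool.not_eq_true] at hp
      simp only [hp, if_false, Bool.false_eq_true]
      rw [ih]

theorem pv_scanA_eq (paths : List (List Int)) (vis : PySem.Set (List Int)) (curr : List Int) :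
    pvScanA paths vis curr =
      ((pvDeg paths curr : Int),
       (pvNbrsB (PySem.Set.ofList paths) curr).filter (fun n => decide (¬ n ∈ vis))) := by
  unfold pvScanA pvDeg pvNbrsB
  simpa using pv_scan_go paths vis curr pvDirs 0 []

theorem pv_nbrlist_nodup (curr : List Int) :
    ((pvDirs.map fun d => [pvC0 curr + d.1, pvC1 curr + d.2])).Nodup := by
  simp [pvDirs]

theorem pv_nbrsB_nodup (nodes : PySem.Set (List Int)) (curr : List Int) :
    (pvNbrsB nodes curr).Nodup :=
  (pv_nbrlist_nodup curr).filter _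

theorem pv_deg_unique (paths : List (List Int)) (v u u' : List Int)
    (hdeg : pvDeg paths v = 1) (h1 : pvAdj paths v u) (h2 : pvAdj paths v u') : u = u' := by
  rw [← pv_mem_nbrsB] at h1 h2
  obtain ⟨a, ha⟩ := List.length_eq_one_iff.mp hdeg
  rw [ha] at h1 h2
  simp at h1 h2
  rw [h1, h2]

theorem pv_adj_symm (paths : List (List Int)) (u v : List Int)
    (hpre : Pre_max_number_of_spikes paths) (hu : u ∈ paths) :
    pvAdj paths u v → pvAdj paths v u := by
  rintro ⟨hv, d, hd, rfl⟩
  have hcase := (hpre u hu).2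
  rcases hcase with hlen | hiso
  swap
  · exact absurd hv (hiso d hd)
  obtain ⟨a, b, rfl⟩ := List.length_eq_two.mp hlen
  simp only [pvDirs, List.mem_cons, List.not_mem_nil, or_false] at hd
  rcases hd with rfl | rfl | rfl | rfl
  · exact ⟨hu, (-1, 0), by simp [pvDirs], by simp [pvC0_pair, pvC1_pair]⟩
  · exact ⟨hu, (1, 0), by simp [pvDirs], by simp [pvC0_pair, pvC1_pair]⟩
  · exact ⟨hu, (0, -1), by simp [pvDirs], by simp [pvC0_pair, pvC1_pair]⟩
  · exact ⟨hu, (0, 1), by simp [pvDirs], by simp [pvC0_pair, pvC1_pair]⟩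

theorem pv_reach_mem (paths : List (List Int)) (start v : List Int) (hs : start ∈ paths) :
    pvReach paths start v → v ∈ paths := by
  intro h
  induction h with
  | refl => exact hs
  | tail _ h2 ih => exact h2.1

theorem pv_reach_subset (paths : List (List Int)) (start v : List Int) (P : List Int → Prop)
    (hstart : P start) (hcl : ∀ x, P x → ∀ m, pvAdj paths x m → P m) :
    pvReach paths start v → P v := by
  intro h
  induction h with
  | refl => exact hstart
  | tail h1 h2 ih => exact hcl _ ih _ h2

theorem pv_reach_symm (paths : List (List Int)) (start v : List Int)
    (hpre : Pre_max_number_of_spikes paths) (hs : start ∈ paths) :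
    pvReach paths start v → pvReach paths v start := by
  intro h
  induction h with
  | refl => exact Relation.ReflTransGen.refl
  | tail h1 h2 ih =>
    exact Relation.ReflTransGen.head
      (pv_adj_symm paths _ _ hpre (pv_reach_mem paths start _ hs h1) h2) ih

theorem pv_adj_tail (paths : List (List Int)) (start u v : List Int) :
    pvReach paths start u → pvAdj paths u v → pvReach paths start v :=
  fun h1 h2 => Relation.ReflTransGen.tail h1 h2

-- loop invariant of A's dfs 'while stack' loop (stack top-first)
structure PvInv (paths : List (List Int)) (start : List Int) (vis0 : List (List Int))
    (stack : List (List Int)) (visited : List (List Int)) (spike : Int) : Prop where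
  nodup : visited.Nodup
  pre : vis0 <+: visited
  visMem : ∀ v ∈ visited, v ∈ vis0 ∨ (v ∈ paths ∧ pvReach paths start v)
  stackMem : ∀ v ∈ stack, v ∈ paths ∧ pvReach paths start v
  closed : ∀ v ∈ visited, ∀ m, pvAdj paths v m → m ∈ visited ∨ m ∈ stack
  pos : ∀ s1 v s2, stack = s1 ++ v :: s2 → v ∈ visited →
      ∀ m, pvAdj paths v m → m ∈ visited ∨ m ∈ s1
  degOnce : ∀ v, pvDeg paths v = 1 → v ∈ visited → v ∉ stack
  degCount : ∀ v, pvDeg paths v = 1 → stack.count v ≤ 1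
  degPushed : ∀ m ∈ stack, pvDeg paths m = 1 → m ∉ visited →
      (∃ u ∈ visited, pvAdj paths u m) ∨ (stack = [start] ∧ m = start)
  spikeEq : spike = ((visited.drop vis0.length).countP (fun v => decide (pvDeg paths v = 1)) : Int)
  startIn : start ∈ visited ∨ start ∈ stack

theorem pv_countP_insert (l S : List (List Int)) (a : List Int)
    (hnd : l.Nodup) (ha : a ∈ l) (haS : a ∉ S) :
    l.countP (fun v => decide (¬ v ∈ S ++ [a])) + 1 = l.countP (fun v => decide (¬ v ∈ S)) := by
  induction l with
  | nil => cases ha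
  | cons x l ih =>
    rcases List.mem_cons.mp ha with rfl | hal
    · have hxl : a ∉ l := (List.nodup_cons.mp hnd).1
      have hcong : l.countP (fun v => decide (¬ v ∈ S ++ [a])) =
          l.countP (fun v => decide (¬ v ∈ S)) := by
        apply List.countP_congr
        intro v hv
        have : v ≠ a := fun h => hxl (h ▸ hv)
        simp [List.mem_append, this]
      rw [List.countP_cons, List.countP_cons, hcong]
      simp [haS]
    · have hnd' := (List.nodup_cons.mp hnd).2
      rw [List.countP_cons, List.countP_cons]
      have hx : (decide (¬ x ∈ S ++ [a])) = (decide (¬ x ∈ S)) := by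
        have : x ≠ a := fun h => (List.nodup_cons.mp hnd).1 (h ▸ hal)
        simp [List.mem_append, this]
      rw [hx]
      have := ih hnd' hal
      omega

theorem pv_step_visited (paths : List (List Int)) (start : List Int) (vis0 : List (List Int))
    (curr : List Int) (rest visited : List (List Int)) (spike : Int)
    (inv : PvInv paths start vis0 (curr :: rest) visited spike) (hc : curr ∈ visited) :
    PySem.Set.add visited curr = visited ∧
    (pvScanA paths visited curr).2 = [] ∧
    ((pvScanA paths visited curr).1 == (1 : Int)) = false ∧
    PvInv paths start vis0 rest visited spike := by
  have hadd : PySem.Set.add visited curr = visited := PySem.Set.add_of_mem hc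
  have hscan := pv_scanA_eq paths visited curr
  have hnbr : ∀ n ∈ pvNbrsB (PySem.Set.ofList paths) curr, n ∈ visited := by
    intro n hn
    have hadj : pvAdj paths curr n := (pv_mem_nbrsB paths curr n).mp hn
    rcases inv.pos [] curr rest rfl hc n hadj with h | h
    · exact h
    · cases h
  refine ⟨hadd, ?_, ?_, ?_⟩
  · rw [hscan]
    simp only [List.filter_eq_nil_iff]
    intro n hn
    simp [hnbr n hn]
  · rw [hscan]
    have hdeg : pvDeg paths curr ≠ 1 := by
      intro h1
      exact inv.degOnce curr h1 hc (List.mem_cons_self)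
    simp [hdeg]
  · refine ⟨inv.nodup, inv.pre, inv.visMem, ?_, ?_, ?_, ?_, ?_, ?_, inv.spikeEq, ?_⟩
    · intro v hv; exact inv.stackMem v (List.mem_cons_of_mem _ hv)
    · intro v hv m hm
      rcases inv.closed v hv m hm with h | h
      · exact Or.inl h
      · rcases List.mem_cons.mp h with rfl | h'
        · exact Or.inl hc
        · exact Or.inr h'
    · intro s1 v s2 hsplit hvvis m hadj
      have : curr :: rest = (curr :: s1) ++ v :: s2 := by rw [hsplit]; rfl
      rcases inv.pos (curr :: s1) v s2 this hvvis m hadj with h | h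
      · exact Or.inl h
      · rcases List.mem_cons.mp h with rfl | h'
        · exact Or.inl hc
        · exact Or.inr h'
    · intro v hd hv hmem
      exact inv.degOnce v hd hv (List.mem_cons_of_mem _ hmem)
    · intro v hd
      have := inv.degCount v hd
      have hle : rest.count v ≤ (curr :: rest).count v := by
        rw [List.count_cons]; omega
      omega
    · intro m hm hd hmv
      rcases inv.degPushed m (List.mem_cons_of_mem _ hm) hd hmv with h | ⟨hst, rfl⟩
      · exact Or.inl h
      · have : rest = [] := by
          have := congrArg List.tail hst; simpa using this
        rw [this] at hm; cases hm
    · rcases inv.startIn with h | h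
      · exact Or.inl h
      · rcases List.mem_cons.mp h with rfl | h'
        · exact Or.inl hc
        · exact Or.inr h'

theorem pv_step_new (paths : List (List Int)) (start : List Int) (vis0 : List (List Int))
    (curr : List Int) (rest visited : List (List Int)) (spike : Int)
    (hpre : Pre_max_number_of_spikes paths) (h0p : ∀ v ∈ vis0, v ∈ paths)
    (inv : PvInv paths start vis0 (curr :: rest) visited spike) (hc : curr ∉ visited) :
    PySem.Set.add visited curr = visited ++ [curr] ∧
    PvInv paths start vis0
      ((pvScanA paths (visited ++ [curr]) curr).2.reverse ++ rest)
      (visited ++ [curr])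
      (if (pvScanA paths (visited ++ [curr]) curr).1 == (1 : Int) then spike + 1 else spike) ∧
    (pvScanA paths (visited ++ [curr]) curr).2.length ≤ 4 := by
  have hadd : PySem.Set.add visited curr = visited ++ [curr] := PySem.Set.add_of_not_mem hc
  set visited' := visited ++ [curr] with hv'
  have hscan := pv_scanA_eq paths visited' curr
  set pushes := (pvNbrsB (PySem.Set.ofList paths) curr).filter (fun n => decide (¬ n ∈ visited'))
    with hpushdef
  have hs2 : (pvScanA paths visited' curr).2 = pushes := by rw [hscan]
  have hs1 : (pvScanA paths visited' curr).1 = ((pvDeg paths curr : Nat) : Int) := by rw [hscan]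
  have hcurrP := inv.stackMem curr List.mem_cons_self
  have visPaths : ∀ v ∈ visited, v ∈ paths := fun v hv =>
    (inv.visMem v hv).elim (h0p v) (fun h => h.1)
  have hmemv' : ∀ v, v ∈ visited' ↔ (v ∈ visited ∨ v = curr) := by
    intro v; simp [hv']
  have hpush_adj : ∀ n ∈ pushes, pvAdj paths curr n := by
    intro n hn
    exact (pv_mem_nbrsB paths curr n).mp (List.mem_of_mem_filter hn)
  have hpush_nvis : ∀ n ∈ pushes, ¬ n ∈ visited' := by
    intro n hn
    have := List.of_mem_filter hn
    simpa using this
  have hpush_choice : ∀ m, pvAdj paths curr m → m ∈ visited' ∨ m ∈ pushes := by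
    intro m hm
    by_cases h : m ∈ visited'
    · exact Or.inl h
    · refine Or.inr ?_
      rw [hpushdef]
      refine List.mem_filter.mpr ⟨(pv_mem_nbrsB paths curr m).mpr hm, by simpa using h⟩
  have hpush_nodup : pushes.Nodup := (pv_nbrsB_nodup _ _).filter _
  have hpush_len : pushes.length ≤ 4 := by
    have h1 : pushes.length ≤ (pvNbrsB (PySem.Set.ofList paths) curr).length :=
      List.length_filter_le _ _
    have h2 : (pvNbrsB (PySem.Set.ofList paths) curr).length ≤ 4 := by
      simp only [pvNbrsB]
      have h3 := List.length_filter_le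
        (fun n => PySem.Set.contains (PySem.Set.ofList paths) n)
        (pvDirs.map (fun d => [pvC0 curr + d.1, pvC1 curr + d.2]))
      simpa [pvDirs] using h3
    omega
  -- uniqueness helper: a degree-1 node adjacent to curr has curr as its only neighbour
  have huniq : ∀ v, pvDeg paths v = 1 → pvAdj paths curr v →
      ∀ u, u ∈ paths → pvAdj paths u v → u = curr := by
    intro v hd hadj u hup hadj'
    have hvadju : pvAdj paths v u := pv_adj_symm paths u v hpre hup hadj'
    have hvadjc : pvAdj paths v curr := pv_adj_symm paths curr v hpre hcurrP.1 hadj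
    exact pv_deg_unique paths v u curr hd hvadju hvadjc
  refine ⟨hadd, ?_, by rw [hs2]; exact hpush_len⟩
  rw [hs2, hs1]
  have hk : vis0.length ≤ visited.length := inv.pre.length_le
  have hdrop : visited'.drop vis0.length = visited.drop vis0.length ++ [curr] := by
    rw [hv', List.drop_append_of_le_length hk]
  refine ⟨?_, ?_, ?_, ?_, ?_, ?_, ?_, ?_, ?_, ?_, ?_⟩
  -- nodup
  · exact List.Nodup.append inv.nodup (List.nodup_singleton curr) (by simpa using hc)
  -- pre
  · exact inv.pre.trans ⟨[curr], rfl⟩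
  -- visMem
  · intro v hv
    rcases (hmemv' v).mp hv with h | rfl
    · exact inv.visMem v h
    · exact Or.inr hcurrP
  -- stackMem
  · intro v hv
    rcases List.mem_append.mp hv with h | h
    · have hv2 := hpush_adj v (List.mem_reverse.mp h)
      exact ⟨hv2.1, pv_adj_tail paths start curr v hcurrP.2 hv2⟩
    · exact inv.stackMem v (List.mem_cons_of_mem _ h)
  -- closed
  · intro v hv m hm
    rcases (hmemv' v).mp hv with h | rfl
    · rcases inv.closed v h m hm with h' | h'
      · exact Or.inl (List.mem_append_left _ h')
      · rcases List.mem_cons.mp h' with rfl | h''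
        · exact Or.inl (by simp [hv'])
        · exact Or.inr (List.mem_append_right _ h'')
    · rcases hpush_choice m hm with h' | h'
      · exact Or.inl h'
      · exact Or.inr (List.mem_append_left _ (List.mem_reverse.mpr h'))
  -- pos
  · intro s1 v s2 hsplit hvvis m hadj
    rcases List.append_eq_append_iff.mp hsplit with ⟨a', ha1, ha2⟩ | ⟨c', hc1, hc2⟩
    · -- s1 = pushes.reverse ++ a', rest = a' ++ v :: s2
      rcases (hmemv' v).mp hvvis with hvv | rfl
      · have : curr :: rest = (curr :: a') ++ v :: s2 := by rw [ha2]; rfl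
        rcases inv.pos (curr :: a') v s2 this hvv m hadj with h | h
        · exact Or.inl (List.mem_append_left _ h)
        · rcases List.mem_cons.mp h with rfl | h'
          · exact Or.inl (by simp [hv'])
          · exact Or.inr (by rw [ha1]; exact List.mem_append_right _ h')
      · rcases hpush_choice m hadj with h' | h'
        · exact Or.inl h'
        · exact Or.inr (by rw [ha1]; exact List.mem_append_left _ (List.mem_reverse.mpr h'))
    · -- pushes.reverse = s1 ++ c', v :: s2 = c' ++ rest
      cases c' with
      | nil =>
        have hs1p : s1 = pushes.reverse := by simpa using hc1.symm
        have hrest : rest = v :: s2 := by simpa using hc2.symm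
        rcases (hmemv' v).mp hvvis with hvv | rfl
        · have : curr :: rest = [curr] ++ v :: s2 := by rw [hrest]; rfl
          rcases inv.pos [curr] v s2 this hvv m hadj with h | h
          · exact Or.inl (List.mem_append_left _ h)
          · rcases List.mem_cons.mp h with rfl | h'
            · exact Or.inl (by simp [hv'])
            · cases h'
        · rcases hpush_choice m hadj with h' | h'
          · exact Or.inl h'
          · exact Or.inr (by rw [hs1p]; exact List.mem_reverse.mpr h')
      | cons y c'' =>
        have hvy : v = y := by
          have := hc2
          simp at this
          exact this.1
        have hyp : y ∈ pushes.reverse := by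
          rw [hc1]
          exact List.mem_append_right _ List.mem_cons_self
        exact absurd hvvis (by
          rw [hvy]
          exact hpush_nvis y (List.mem_reverse.mp hyp))
  -- degOnce
  · intro v hd hv hmem
    rcases List.mem_append.mp hmem with h | h
    · exact hpush_nvis v (List.mem_reverse.mp h) hv
    · rcases (hmemv' v).mp hv with hvv | rfl
      · exact inv.degOnce v hd hvv (List.mem_cons_of_mem _ h)
      · have := inv.degCount v hd
        rw [List.count_cons_self] at this
        have hz : rest.count v = 0 := by omega
        exact (List.count_eq_zero.mp hz) h
  -- degCount
  · intro v hd
    rw [List.count_append, List.count_reverse]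
    by_cases hvp : v ∈ pushes
    · have h1 : pushes.count v ≤ 1 := List.nodup_iff_count_le_one.mp hpush_nodup v
      have h2 : rest.count v = 0 := by
        rw [List.count_eq_zero]
        intro hvrest
        have hnv' : ¬ v ∈ visited' := hpush_nvis v hvp
        have hnv : ¬ v ∈ visited := fun h => hnv' (List.mem_append_left _ h)
        rcases inv.degPushed v (List.mem_cons_of_mem _ hvrest) hd hnv with ⟨u, hu, hadj⟩ | ⟨hst, rfl⟩
        · have : u = curr := huniq v hd (hpush_adj v hvp) u (visPaths u hu) hadj
          exact hc (this ▸ hu)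
        · have : rest = [] := by
            have := congrArg List.tail hst; simpa using this
          rw [this] at hvrest; cases hvrest
      omega
    · have h1 : pushes.count v = 0 := List.count_eq_zero.mpr hvp
      have h2 := inv.degCount v hd
      rw [List.count_cons] at h2
      omega
  -- degPushed
  · intro m hm hd hmv
    rcases List.mem_append.mp hm with h | h
    · exact Or.inl ⟨curr, by simp [hv'], hpush_adj m (List.mem_reverse.mp h)⟩
    · have hmnv : ¬ m ∈ visited := fun hx => hmv (List.mem_append_left _ hx)
      rcases inv.degPushed m (List.mem_cons_of_mem _ h) hd hmnv with ⟨u, hu, hadj⟩ | ⟨hst, rfl⟩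
      · exact Or.inl ⟨u, List.mem_append_left _ hu, hadj⟩
      · have : rest = [] := by
          have := congrArg List.tail hst; simpa using this
        rw [this] at h; cases h
  -- spikeEq
  · rw [hdrop, List.countP_append, inv.spikeEq]
    by_cases hdeg : pvDeg paths curr = 1
    · simp [hdeg]
    · simp [hdeg]
  -- startIn
  · rcases inv.startIn with h | h
    · exact Or.inl (List.mem_append_left _ h)
    · rcases List.mem_cons.mp h with rfl | h'
      · exact Or.inl (by simp [hv'])
      · exact Or.inr (List.mem_append_right _ h')

theorem pv_unvis_le (paths S : List (List Int)) : pvUnvis paths S ≤ paths.length := by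
  unfold pvUnvis
  refine le_trans List.countP_le_length ?_
  rw [PySem.List.dedup_eq_ofList]
  exact PySem.Set.length_ofList_le paths

theorem pv_dfsA_main (paths : List (List Int)) (start : List Int) (vis0 : List (List Int))
    (hpre : Pre_max_number_of_spikes paths) (h0p : ∀ v ∈ vis0, v ∈ paths) :
    ∀ fuel stack visited spike, PvInv paths start vis0 stack visited spike →
      5 * pvUnvis paths visited + stack.length < fuel →
      ∃ visited' spike', pvDfsA paths fuel stack visited spike = (visited', spike') ∧
        PvInv paths start vis0 [] visited' spike' := by
  intro fuel
  induction fuel with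
  | zero => intro stack visited spike _ hm; omega
  | succ fuel ih =>
    intro stack visited spike inv hm
    cases stack with
    | nil => exact ⟨visited, spike, rfl, inv⟩
    | cons curr rest =>
      by_cases hc : curr ∈ visited
      · obtain ⟨hadd, hs2, hs1, inv'⟩ :=
          pv_step_visited paths start vis0 curr rest visited spike inv hc
        have heq : pvDfsA paths (fuel + 1) (curr :: rest) visited spike =
            pvDfsA paths fuel rest visited spike := by
          simp only [pvDfsA, hadd, hs2, hs1]
          simp
        rw [heq]
        exact ih rest visited spike inv' (by simp at hm ⊢; omega)
      · obtain ⟨hadd, inv', hlen⟩ :=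
          pv_step_new paths start vis0 curr rest visited spike hpre h0p inv hc
        have heq : pvDfsA paths (fuel + 1) (curr :: rest) visited spike =
            pvDfsA paths fuel
              ((pvScanA paths (visited ++ [curr]) curr).2.reverse ++ rest)
              (visited ++ [curr])
              (if (pvScanA paths (visited ++ [curr]) curr).1 == (1 : Int) then spike + 1
               else spike) := by
          simp only [pvDfsA, hadd]
        rw [heq]
        have hcurrp : curr ∈ paths := (inv.stackMem curr List.mem_cons_self).1
        have hmeas : pvUnvis paths (visited ++ [curr]) + 1 = pvUnvis paths visited := by
          unfold pvUnvis
          exact pv_countP_insert (PySem.List.dedup paths) visited curr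
            (by simp only [PySem.List.dedup_eq_ofList]; exact PySem.Set.nodup_ofList paths)
            (by simp only [PySem.List.dedup_eq_ofList]
                exact (PySem.Set.mem_ofList _ _).mpr hcurrp) hc
        apply ih _ _ _ inv'
        have : ((pvScanA paths (visited ++ [curr]) curr).2.reverse ++ rest).length ≤
            4 + rest.length := by
          rw [List.length_append, List.length_reverse]; omega
        simp only [List.length_cons] at hm
        omega

theorem pv_dfsA_run (paths : List (List Int)) (start : List Int) (vis0 : List (List Int))
    (hpre : Pre_max_number_of_spikes paths) (h0p : ∀ v ∈ vis0, v ∈ paths)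
    (hnd0 : vis0.Nodup) (hcl0 : ∀ v ∈ vis0, ∀ m, pvAdj paths v m → m ∈ vis0)
    (hs : start ∈ paths) (hs0 : start ∉ vis0) :
    ∃ newl,
      pvDfsA paths (5 * paths.length + 2) [start] vis0 0 =
        (vis0 ++ newl, ((newl.countP (fun v => decide (pvDeg paths v = 1)) : Nat) : Int)) ∧
      newl.Nodup ∧ (vis0 ++ newl).Nodup ∧
      (∀ v, v ∈ newl ↔ pvReach paths start v) ∧
      (∀ v, v ∈ vis0 ++ newl ↔ (v ∈ vis0 ∨ pvReach paths start v)) := by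
  have inv0 : PvInv paths start vis0 [start] vis0 0 := by
    refine ⟨hnd0, List.prefix_refl _, ?_, ?_, ?_, ?_, ?_, ?_, ?_, by simp, Or.inr List.mem_cons_self⟩
    · intro v hv; exact Or.inl hv
    · intro v hv
      rcases List.mem_singleton.mp hv with rfl
      exact ⟨hs, Relation.ReflTransGen.refl⟩
    · intro v hv m hm; exact Or.inl (hcl0 v hv m hm)
    · intro s1 v s2 hsplit hvvis m hadj
      have hvmem : v ∈ [start] := by rw [hsplit]; exact List.mem_append_right _ List.mem_cons_self
      rcases List.mem_singleton.mp hvmem with rfl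
      exact absurd hvvis hs0
    · intro v _ hv hmem
      rcases List.mem_singleton.mp hmem with rfl
      exact hs0 hv
    · intro v _
      have : ([start] : List (List Int)).count v ≤ [start].length := List.count_le_length
      simpa using this
    · intro m hm _ _
      rcases List.mem_singleton.mp hm with rfl
      exact Or.inr ⟨rfl, rfl⟩
  have hmeas : 5 * pvUnvis paths vis0 + ([start] : List (List Int)).length <
      5 * paths.length + 2 := by
    have := pv_unvis_le paths vis0
    simp only [List.length_singleton]
    omega
  obtain ⟨visited', spike', heq, inv'⟩ :=
    pv_dfsA_main paths start vis0 hpre h0p (5 * paths.length + 2) [start] vis0 0 inv0 hmeas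
  obtain ⟨newl, rfl⟩ := inv'.pre
  have hdrop : (vis0 ++ newl).drop vis0.length = newl := List.drop_left
  have hndall : (vis0 ++ newl).Nodup := inv'.nodup
  have hdisj : ∀ v ∈ newl, v ∉ vis0 := by
    intro v hv hv0
    exact (List.disjoint_of_nodup_append hndall) hv0 hv
  have hstartv : start ∈ vis0 ++ newl := by
    rcases inv'.startIn with h | h
    · exact h
    · cases h
  have hclosed' : ∀ v ∈ vis0 ++ newl, ∀ m, pvAdj paths v m → m ∈ vis0 ++ newl := by
    intro v hv m hm
    rcases inv'.closed v hv m hm with h | h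
    · exact h
    · cases h
  have hreach_in : ∀ v, pvReach paths start v → v ∈ vis0 ++ newl := by
    intro v
    exact pv_reach_subset paths start v _ hstartv hclosed'
  have hreach_not0 : ∀ v, pvReach paths start v → v ∉ vis0 := by
    intro v hr hv0
    have hback : pvReach paths v start := pv_reach_symm paths start v hpre hs hr
    have : start ∈ vis0 := pv_reach_subset paths v start _ hv0
      (fun x hx m hm => hcl0 x hx m hm) hback
    exact hs0 this
  have hmem_new : ∀ v, v ∈ newl ↔ pvReach paths start v := by
    intro v
    constructor
    · intro hv
      rcases inv'.visMem v (List.mem_append_right _ hv) with h | h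
      · exact absurd h (hdisj v hv)
      · exact h.2
    · intro hr
      rcases List.mem_append.mp (hreach_in v hr) with h | h
      · exact absurd h (hreach_not0 v hr)
      · exact h
  refine ⟨newl, ?_, (List.nodup_append.mp hndall).2.1, hndall, hmem_new, ?_⟩
  · rw [heq, inv'.spikeEq, hdrop]
  · intro v
    constructor
    · intro hv
      rcases List.mem_append.mp hv with h | h
      · exact Or.inl h
      · exact Or.inr ((hmem_new v).mp h)
    · intro hv
      rcases hv with h | h
      · exact List.mem_append_left _ h
      · exact hreach_in v h

theorem pv_foldl_update_mem {α : Type} [BEq α] [LawfulBEq α] (f : α → List α)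
    (L : List α) (s : List α) (y : α) :
    (y ∈ L.foldl (fun s u => PySem.Set.update s (f u)) s) ↔
      (y ∈ s ∨ ∃ u ∈ L, y ∈ f u) := by
  induction L generalizing s with
  | nil => simp
  | cons x L ih =>
    simp only [List.foldl_cons]
    rw [ih]
    rw [PySem.Set.mem_update]
    constructor
    · rintro (⟨h | h⟩ | ⟨u, hu, hy⟩)
      · exact Or.inl h
      · exact Or.inr ⟨x, List.mem_cons_self, h⟩
      · exact Or.inr ⟨u, List.mem_cons_of_mem _ hu, hy⟩
    · rintro (h | ⟨u, hu, hy⟩)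
      · exact Or.inl (Or.inl h)
      · rcases List.mem_cons.mp hu with rfl | hu'
        · exact Or.inl (Or.inr hy)
        · exact Or.inr ⟨u, hu', hy⟩

theorem pv_foldl_update_prefix {α : Type} [BEq α] [LawfulBEq α] (f : α → List α)
    (L : List α) (s : List α) :
    s <+: L.foldl (fun s u => PySem.Set.update s (f u)) s := by
  induction L generalizing s with
  | nil => exact List.prefix_refl _
  | cons x L ih =>
    simp only [List.foldl_cons]
    refine List.IsPrefix.trans ?_ (ih _)
    rw [PySem.Set.update_eq_append_filter]
    exact ⟨_, rfl⟩

theorem pv_foldl_update_nodup {α : Type} [BEq α] [LawfulBEq α] (f : α → List α)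
    (L : List α) (s : List α) (h : s.Nodup) :
    (L.foldl (fun s u => PySem.Set.update s (f u)) s).Nodup := by
  induction L generalizing s with
  | nil => exact h
  | cons x L ih =>
    simp only [List.foldl_cons]
    exact ih _ (PySem.Set.nodup_update (s := s) (xs := f x) h)

theorem pv_growB_mem (paths comp : List (List Int)) (y : List Int) :
    y ∈ pvGrowB (PySem.Set.ofList paths) comp ↔
      (y ∈ comp ∨ ∃ u ∈ comp, pvAdj paths u y) := by
  unfold pvGrowB
  rw [pv_foldl_update_mem]
  constructor
  · rintro (h | ⟨u, hu, hy⟩)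
    · exact Or.inl h
    · exact Or.inr ⟨u, hu, (pv_mem_nbrsB paths u y).mp hy⟩
  · rintro (h | ⟨u, hu, hy⟩)
    · exact Or.inl h
    · exact Or.inr ⟨u, hu, (pv_mem_nbrsB paths u y).mpr hy⟩

theorem pv_nodup_len_le (paths l : List (List Int)) (hnd : l.Nodup)
    (hsub : ∀ v ∈ l, v ∈ paths) : l.length ≤ (PySem.Set.ofList paths).length := by
  have hsub' : l ⊆ PySem.Set.ofList paths := by
    intro v hv; exact (PySem.Set.mem_ofList _ _).mpr (hsub v hv)
  exact (List.subperm_of_subset hnd hsub').length_le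

theorem pv_satB_run (paths : List (List Int)) (start : List Int) (hs : start ∈ paths) :
    ∀ fuel comp, comp.Nodup → (∀ v ∈ comp, pvReach paths start v) → start ∈ comp →
      (PySem.Set.ofList paths).length + 1 - comp.length < fuel →
      ∃ comp', pvSatB (PySem.Set.ofList paths) fuel comp = comp' ∧ comp'.Nodup ∧
        (∀ v, v ∈ comp' ↔ pvReach paths start v) := by
  intro fuel
  induction fuel with
  | zero => intro comp _ _ _ hm; omega
  | succ fuel ih =>
    intro comp hnd hreach hstart hm
    have hcomp_le : comp.length ≤ (PySem.Set.ofList paths).length :=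
      pv_nodup_len_le paths comp hnd
        (fun v hv => pv_reach_mem paths start v hs (hreach v hv))
    have hgmem := pv_growB_mem paths comp
    have hgpre : comp <+: pvGrowB (PySem.Set.ofList paths) comp :=
      pv_foldl_update_prefix _ _ _
    have hgnd : (pvGrowB (PySem.Set.ofList paths) comp).Nodup :=
      pv_foldl_update_nodup _ _ _ hnd
    have hgreach : ∀ v ∈ pvGrowB (PySem.Set.ofList paths) comp, pvReach paths start v := by
      intro v hv
      rcases (hgmem v).mp hv with h | ⟨u, hu, hadj⟩
      · exact hreach v h
      · exact pv_adj_tail paths start u v (hreach u hu) hadj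
    simp only [pvSatB]
    by_cases hlen : (pvGrowB (PySem.Set.ofList paths) comp).length = comp.length
    · simp only [hlen, if_true]
      have hgeq : comp = pvGrowB (PySem.Set.ofList paths) comp :=
        List.IsPrefix.eq_of_length hgpre hlen.symm
      have hclosed : ∀ u ∈ comp, ∀ m, pvAdj paths u m → m ∈ comp := by
        intro u hu m hadj
        rw [hgeq]
        exact (hgmem m).mpr (Or.inr ⟨u, hu, hadj⟩)
      refine ⟨comp, rfl, hnd, ?_⟩
      intro v
      constructor
      · intro hv; exact hreach v hv
      · intro hr; exact pv_reach_subset paths start v _ hstart hclosed hr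
    · simp only [hlen, if_false]
      have hglen : comp.length < (pvGrowB (PySem.Set.ofList paths) comp).length :=
        lt_of_le_of_ne hgpre.length_le (fun h => hlen h.symm)
      exact ih _ hgnd hgreach (hgpre.subset hstart) (by
        have := pv_nodup_len_le paths _ hgnd
          (fun v hv => pv_reach_mem paths start v hs (hgreach v hv))
        omega)

theorem pv_sum_fold (paths : List (List Int)) (L : List (List Int)) (c : Int) :
    L.foldl (fun s u => s + (if (pvNbrsB (PySem.Set.ofList paths) u).length == 1 then 1 else 0)) c =
      c + ((L.countP (fun u => decide (pvDeg paths u = 1)) : Nat) : Int) := by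
  induction L generalizing c with
  | nil => simp
  | cons x L ih =>
    simp only [List.foldl_cons, List.countP_cons]
    rw [ih]
    by_cases hx : pvDeg paths x = 1
    · have : ((pvNbrsB (PySem.Set.ofList paths) x).length == 1) = true := by
        simpa [pvDeg] using hx
      simp only [this, if_true]
      simp [hx]
      push_cast
      ring
    · have : ((pvNbrsB (PySem.Set.ofList paths) x).length == 1) = false := by
        simpa [pvDeg] using hx
      simp only [this, if_false]
      simp [hx]

theorem pv_outer (paths : List (List Int)) (hpre : Pre_max_number_of_spikes paths) :
    ∀ (L : List (List Int)), (∀ p ∈ L, p ∈ paths) →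
    ∀ (visA visB : List (List Int)) (res : Int),
      visA.Nodup → visB.Nodup →
      (∀ v, v ∈ visA ↔ v ∈ visB) →
      (∀ v ∈ visA, v ∈ paths) →
      (∀ v ∈ visA, ∀ m, pvAdj paths v m → m ∈ visA) →
      (L.foldl
        (fun (acc : PySem.Set (List Int) × Int) path =>
          if path ∈ acc.1 then acc
          else
            let r := pvDfsA paths (5 * paths.length + 2) [path] acc.1 0
            (r.1, max acc.2 r.2)) (visA, res)).2 =
      (L.foldl
        (fun (acc : PySem.Set (List Int) × Int) p =>
          if p ∈ acc.1 then acc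
          else
            let comp := pvSatB (PySem.Set.ofList paths) (paths.length + 2)
              (PySem.Set.add PySem.Set.empty p)
            (PySem.Set.update acc.1 comp,
             max acc.2 (comp.foldl
               (fun s u => s + (if (pvNbrsB (PySem.Set.ofList paths) u).length == 1 then 1 else 0))
               0))) (visB, res)).2 := by
  intro L
  induction L with
  | nil => intro _ visA visB res _ _ _ _ _; rfl
  | cons p L ih =>
    intro hLp visA visB res hndA hndB hmemAB hsubA hclA
    have hpp : p ∈ paths := hLp p List.mem_cons_self
    have hLp' : ∀ q ∈ L, q ∈ paths := fun q hq => hLp q (List.mem_cons_of_mem _ hq)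
    simp only [List.foldl_cons]
    by_cases hmem : p ∈ visA
    · rw [if_pos hmem, if_pos ((hmemAB p).mp hmem)]
      exact ih hLp' visA visB res hndA hndB hmemAB hsubA hclA
    · have hmemB : ¬ p ∈ visB := fun h => hmem ((hmemAB p).mpr h)
      rw [if_neg hmem, if_neg hmemB]
      -- run A's dfs
      obtain ⟨newl, hrun, hndnew, hndall, hmemnew, hmemall⟩ :=
        pv_dfsA_run paths p visA hpre hsubA hndA hclA hpp hmem
      -- run B's saturation
      have hstart1 : PySem.Set.add PySem.Set.empty p = [p] := rfl
      obtain ⟨comp', hsat, hndc, hmemc⟩ :=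
        pv_satB_run paths p hpp (paths.length + 2) [p] (List.nodup_singleton p)
          (by intro v hv; rcases List.mem_singleton.mp hv with rfl; exact Relation.ReflTransGen.refl)
          List.mem_cons_self
          (by have := PySem.Set.length_ofList_le paths; simp; omega)
      rw [hstart1] at *
      simp only [hrun, hsat]
      -- the two per-component spike counts agree
      have hperm : newl.Perm comp' := by
        rw [List.perm_ext_iff_of_nodup hndnew hndc]
        intro v; rw [hmemnew v, hmemc v]
      have hcnt : newl.countP (fun v => decide (pvDeg paths v = 1)) =
          comp'.countP (fun v => decide (pvDeg paths v = 1)) := hperm.countP_eq _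
      rw [pv_sum_fold paths comp' 0, ← hcnt]
      have hres : max res ((newl.countP (fun v => decide (pvDeg paths v = 1)) : Nat) : Int) =
          max res (0 + ((newl.countP (fun v => decide (pvDeg paths v = 1)) : Nat) : Int)) := by
        omega
      rw [← hres]
      -- invariants for the remaining iterations
      apply ih hLp' (visA ++ newl) (PySem.Set.update visB comp') _ hndall
        (PySem.Set.nodup_update (s := visB) (xs := comp') hndB)
      · intro v
        rw [PySem.Set.mem_update, hmemall v, hmemAB v, hmemc v]
      · intro v hv
        rcases (hmemall v).mp hv with h | h
        · exact hsubA v h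
        · exact pv_reach_mem paths p v hpp h
      · intro v hv m hm
        rcases (hmemall v).mp hv with h | h
        · exact (hmemall m).mpr (Or.inl (hclA v h m hm))
        · exact (hmemall m).mpr (Or.inr (pv_adj_tail paths p v m h hm))

-- ===== VERDICT (by name: the statement is the Claim_ definition above) =====
theorem max_number_of_spikes_spec : Claim_equal_max_number_of_spikes := by
  intro paths _ hpre
  unfold Spec_max_number_of_spikes max_number_of_spikes max_number_of_spikes_alt
  exact pv_outer paths hpre paths (fun p hp => hp) [] [] 1 List.nodup_nil List.nodup_nil
    (fun v => Iff.rfl) (by simp) (by simp)
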